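-- pv_equiv track=rewrite | github.com/Din0zaBr/DSTU | crypto/second_lab/sixth.py | encrypt_affina_ceasar
-- ===== SOURCE A (Python) =====
-- def encrypt_affina_ceasar(a, b, phrase, alp):
--     encrypted_phrase = ''
--
--     for letter in phrase:
--         if letter not in alp:
--             encrypted_phrase += letter
--         else:
--             letter_index = (a * alp.index(letter) + b) % len(alp)
--             encrypted_phrase += alp[letter_index]
--     return encrypted_phrase
-- ===== SOURCE B (Python) =====
-- def encrypt_affina_ceasar(a, b, phrase, alp):
--     n = len(alp)
--     # inverted index: for each character, the positions where it occurs in the phrase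
--     positions = {}
--     for j, p in enumerate(phrase):
--         positions.setdefault(p, []).append(j)
--     # output buffer preinitialized with the phrase; non-alphabet chars are never touched
--     out = list(phrase)
--     seen = set()
--     for i, c in enumerate(alp):
--         if c not in seen:
--             seen.add(c)
--             img = alp[(a * i + b) % n]
--             for j in positions.get(c, []):
--                 out[j] = img
--     return ''.join(out)
-- ===== Notes on version B (the rewrite author's own statement) =====
-- stated objective: faster
-- what changed: B inverts the traversal: it builds an inverted index of phrase positions per character, then iterates the ALPHABET once, scattering each first-seen character's affine image into a preallocated output buffer at the recorded positions, instead of A's per-phrase-character membership test and alp.index scan.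
import Mathlib
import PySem

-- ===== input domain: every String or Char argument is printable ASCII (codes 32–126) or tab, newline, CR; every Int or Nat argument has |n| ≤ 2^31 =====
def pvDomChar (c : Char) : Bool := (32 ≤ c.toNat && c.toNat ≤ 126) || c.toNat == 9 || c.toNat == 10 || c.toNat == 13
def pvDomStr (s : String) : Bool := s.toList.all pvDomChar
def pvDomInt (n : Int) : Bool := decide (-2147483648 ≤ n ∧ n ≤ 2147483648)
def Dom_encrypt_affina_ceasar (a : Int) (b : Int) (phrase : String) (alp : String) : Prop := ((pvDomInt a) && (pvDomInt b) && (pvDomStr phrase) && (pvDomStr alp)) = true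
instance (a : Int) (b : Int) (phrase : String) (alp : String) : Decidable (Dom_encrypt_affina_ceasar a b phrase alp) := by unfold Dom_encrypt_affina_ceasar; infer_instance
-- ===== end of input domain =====

-- B inverts the traversal (inverted positions index over the phrase, then one scatter pass over the
-- alphabet into a preallocated output buffer); equivalence of return values is proved on the whole domain.

-- ===== PORT A =====
-- literal transliteration of A: fold over the phrase, per letter either pass through or
-- compute the affine image via alp.index / % len(alp) / alp[...] (the 'none' fallbacks are the
-- points where the Python would raise; both are unreachable in A's guarded code).
def encrypt_affina_ceasar (a : Int) (b : Int) (phrase : String) (alp : String) : String :=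
  String.mk (phrase.toList.foldl (fun encrypted letter =>
    if letter ∉ alp.toList then
      encrypted ++ [letter]
    else
      match PySem.List.index? alp.toList letter with
      | some li =>
        match PySem.List.pyGet? alp.toList
            (PySem.Int.mod (a * (li : Int) + b) (alp.toList.length : Int)) with
        | some ch => encrypted ++ [ch]
        | none => encrypted
      | none => encrypted) [])

-- ===== PORT B =====
-- literal transliteration of B (Source B): first build the inverted index 'positions'
-- (positions.setdefault(p, []).append(j) is Dict.modify p [] (· ++ [j])); then iterate
-- enumerate(alp) with a 'seen' set, scattering the first-seen char's image into the
-- output buffer (out[j] = img is pySetD; the index is always in range). The 'none'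
-- fallback of alp[(a*i+b) % n] is unreachable (the loop only runs on a nonempty alp).
def encrypt_affina_ceasar_alt (a : Int) (b : Int) (phrase : String) (alp : String) : String :=
  let n : Int := (alp.toList.length : Int)
  let positions : PySem.Dict Char (List Int) :=
    (PySem.List.enumerate phrase.toList).foldl
      (fun d p => d.modify p.2 [] (· ++ [p.1])) PySem.Dict.empty
  let res : List Char × PySem.Set Char :=
    (PySem.List.enumerate alp.toList).foldl
      (fun st p =>
        if PySem.Set.contains st.2 p.2 then st
        else
          match PySem.List.pyGet? alp.toList (PySem.Int.mod (a * p.1 + b) n) with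
          | some img =>
            ((positions.getD p.2 []).foldl (fun o j => PySem.List.pySetD o j img) st.1,
              PySem.Set.add st.2 p.2)
          | none => (st.1, PySem.Set.add st.2 p.2))
      (phrase.toList, PySem.Set.empty)
  String.mk res.1

-- ===== PRECONDITION & SPEC =====
def Spec_encrypt_affina_ceasar (a : Int) (b : Int) (phrase : String) (alp : String) (out : String) : Prop := out = encrypt_affina_ceasar_alt a b phrase alp
instance (a : Int) (b : Int) (phrase : String) (alp : String) (out : String) : Decidable (Spec_encrypt_affina_ceasar a b phrase alp out) := by unfold Spec_encrypt_affina_ceasar; infer_instance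

-- ===== CLAIM =====
def Claim_equal_encrypt_affina_ceasar : Prop := ∀ (a : Int) (b : Int) (phrase : String) (alp : String), Dom_encrypt_affina_ceasar a b phrase alp → Spec_encrypt_affina_ceasar a b phrase alp (encrypt_affina_ceasar a b phrase alp)

-- ===== LEMMAS AND PROOFS =====

-- the affine image of alphabet index i, and the total per-character substitution map
def pvImg (a b : Int) (alp : List Char) (i : Int) : Option Char :=
  PySem.List.pyGet? alp (PySem.Int.mod (a * i + b) (alp.length : Int))

def pvMap (a b : Int) (alp : List Char) (c : Char) : Char :=
  (((PySem.List.index? alp c).bind (fun k => pvImg a b alp (k : Int)))).getD c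

-- the positions (as Ints) at which c occurs in the phrase
def pvJs (l : List Char) (c : Char) : List Int :=
  ((PySem.List.enumerate l).filter (fun p => p.2 == c)).map (·.1)

-- the affine index is always in range once the alphabet is nonempty
theorem pv_img_isSome (a b : Int) (alp : List Char) (h : alp ≠ []) (i : Int) :
    (pvImg a b alp i).isSome = true := by
  have hn : (0 : Int) < (alp.length : Int) := by
    have := List.length_pos_iff.mpr h
    exact_mod_cast this
  have h0 : (0 : Int) ≤ PySem.Int.mod (a * i + b) (alp.length : Int) :=
    PySem.Int.mod_nonneg _ hn
  have h1 := PySem.Int.mod_lt (a * i + b) hn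
  rw [pvImg, PySem.List.pyGet?_eq_some_getElem alp h0 h1]
  rfl

-- A's fold is a map of pvMap over the phrase (identity outside the alphabet)
theorem pv_A_fold (a b : Int) (alp : List Char) :
    ∀ (l : List Char) (acc : List Char),
      l.foldl (fun encrypted letter =>
        if letter ∉ alp then
          encrypted ++ [letter]
        else
          match PySem.List.index? alp letter with
          | some li =>
            match PySem.List.pyGet? alp (PySem.Int.mod (a * (li : Int) + b) (alp.length : Int)) with
            | some ch => encrypted ++ [ch]
            | none => encrypted
          | none => encrypted) acc
      = acc ++ l.map (fun c => if c ∈ alp then pvMap a b alp c else c) := by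
  intro l
  induction l with
  | nil => intro acc; simp
  | cons c l ih =>
    intro acc
    simp only [List.foldl_cons, List.map_cons]
    have hstep : (if c ∉ alp then acc ++ [c]
        else
          match PySem.List.index? alp c with
          | some li =>
            match PySem.List.pyGet? alp (PySem.Int.mod (a * (li : Int) + b) (alp.length : Int)) with
            | some ch => acc ++ [ch]
            | none => acc
          | none => acc)
        = acc ++ [if c ∈ alp then pvMap a b alp c else c] := by
      by_cases hc : c ∈ alp
      · have hne : alp ≠ [] := by rintro rfl; simp at hc
        obtain ⟨k, hk⟩ := Option.isSome_iff_exists.mp ((PySem.List.index?_isSome_iff alp c).mpr hc)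
        obtain ⟨ch, hch⟩ := Option.isSome_iff_exists.mp (pv_img_isSome a b alp hne (k : Int))
        rw [pvImg] at hch
        rw [if_neg (not_not_intro hc), if_pos hc]
        unfold pvMap pvImg
        rw [hk]
        simp [hch]
      · simp [hc]
    rw [hstep, ih]
    simp

-- membership in pvJs: exactly the phrase positions holding c (no other Ints, all in range)
theorem pv_mem_pvJs (l : List Char) (c : Char) (j : Int) :
    j ∈ pvJs l c ↔ ∃ (k : Nat) (hk : k < l.length), j = (k : Int) ∧ l[k] = c := by
  unfold pvJs
  simp only [List.mem_map, List.mem_filter, PySem.List.mem_enumerate_iff]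
  constructor
  · rintro ⟨p, ⟨⟨k, hk, rfl⟩, hc⟩, rfl⟩
    exact ⟨k, hk, by simp, by simpa using hc⟩
  · rintro ⟨k, hk, rfl, hc⟩
    exact ⟨((k : Int), c), ⟨⟨k, hk, by simp [hc]⟩, by simp⟩, rfl⟩

-- B's positions dict looked up at c yields pvJs
theorem pv_positions_getD (l : List Char) (c : Char) :
    ((PySem.List.enumerate l).foldl
        (fun d p => d.modify p.2 [] (· ++ [p.1])) PySem.Dict.empty).getD c []
      = pvJs l c := by
  have h : (PySem.List.enumerate l).foldl
        (fun d p => d.modify p.2 [] (· ++ [p.1])) (PySem.Dict.empty : PySem.Dict Char (List Int))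
      = ((PySem.List.enumerate l).map (fun p => (p.2, p.1))).foldl
        (fun d q => d.modify q.1 [] (· ++ [q.2])) PySem.Dict.empty := by
    rw [List.foldl_map]
  rw [h, PySem.Dict.getD_foldl_modify_append]
  unfold pvJs
  simp [List.filter_map, List.map_map, Function.comp_def]

-- scattering img over a list of in-range indices, read back at position k
theorem pv_scatter_get? (img : Char) :
    ∀ (js : List Int) (o : List Char),
      (∀ j ∈ js, 0 ≤ j ∧ j < (o.length : Int)) →
      ∀ (k : Nat),
        (js.foldl (fun o j => PySem.List.pySetD o j img) o)[k]?
          = if (k : Int) ∈ js then some img else o[k]? := by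
  intro js
  induction js with
  | nil => intro o _ k; simp
  | cons j js ih =>
    intro o ho k
    obtain ⟨hj0, hjlt⟩ := ho j (by simp)
    have hlen : (PySem.List.pySetD o j img).length = o.length := PySem.List.length_pySetD o j img
    simp only [List.foldl_cons]
    rw [ih (PySem.List.pySetD o j img)
        (fun x hx => by rw [hlen]; exact ho x (by simp [hx])) k]
    rw [PySem.List.pySetD_of_nonneg o img hj0]
    have hjk : j.toNat = k ↔ (k : Int) = j := by omega
    by_cases hmem : (k : Int) ∈ js
    · simp [hmem]
    · by_cases hkj : (k : Int) = j
      · have hk : k < o.length := by omega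
        simp [hkj, hjk.mpr hkj, hk]
      · have hne : j.toNat ≠ k := fun h => hkj (hjk.mp h)
        simp [hmem, hkj, hne]

-- scattering pvJs over a mapped phrase is a pointwise function update
theorem pv_scatter_map (l : List Char) (g : Char → Char) (c img : Char) :
    (pvJs l c).foldl (fun o j => PySem.List.pySetD o j img) (l.map g)
      = l.map (fun x => if x = c then img else g x) := by
  have hrange : ∀ j ∈ pvJs l c, 0 ≤ j ∧ j < ((l.map g).length : Int) := by
    intro j hj
    obtain ⟨k, hk, rfl, _⟩ := (pv_mem_pvJs l c j).mp hj
    refine ⟨Int.natCast_nonneg k, ?_⟩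
    simp
    exact_mod_cast hk
  apply List.ext_getElem?
  intro k
  rw [pv_scatter_get? img (pvJs l c) (l.map g) hrange k]
  by_cases hk : k < l.length
  · by_cases hc : l[k] = c
    · have hmem : (k : Int) ∈ pvJs l c := (pv_mem_pvJs l c (k : Int)).mpr ⟨k, hk, rfl, hc⟩
      simp [hmem, hk, hc]
    · have hmem : (k : Int) ∉ pvJs l c := by
        intro h
        obtain ⟨k', hk', hkk, hc'⟩ := (pv_mem_pvJs l c (k : Int)).mp h
        have : k' = k := by omega
        exact hc (this ▸ hc')
      simp [hmem, hk, hc]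
  · have hmem : (k : Int) ∉ pvJs l c := by
      intro h
      obtain ⟨k', hk', hkk, _⟩ := (pv_mem_pvJs l c (k : Int)).mp h
      omega
    simp [hmem, List.getElem?_eq_none (by simpa using Nat.le_of_not_lt hk),
      List.getElem?_eq_none (le_of_eq_of_le (List.length_map g) (Nat.le_of_not_lt hk))]

-- first index of x in pre ++ x :: rest when x does not occur in pre
theorem pv_index_first (pre rest : List Char) (x : Char) (hx : x ∉ pre) :
    PySem.List.index? (pre ++ x :: rest) x = some pre.length :=
  (PySem.List.index?_eq_some_iff _ _ _).mpr ⟨pre, rest, rfl, rfl, hx⟩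

-- the main-loop invariant of B: after processing the prefix 'pre' of the alphabet the
-- buffer maps exactly the chars of 'pre' through pvMap, and finishing the suffix completes it
theorem pv_B_loop (a b : Int) (pl : List Char) (alp : List Char) :
    ∀ (suf pre : List Char) (seen : PySem.Set Char) (g : Char → Char),
      alp = pre ++ suf →
      (∀ c, PySem.Set.contains seen c = true ↔ c ∈ pre) →
      g = (fun c => if c ∈ pre then pvMap a b alp c else c) →
      ((PySem.List.enumerate suf (pre.length : Int)).foldl
          (fun st p =>
            if PySem.Set.contains st.2 p.2 then st
            else
              match PySem.List.pyGet? alp (PySem.Int.mod (a * p.1 + b) (alp.length : Int)) with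
              | some img =>
                ((((PySem.List.enumerate pl).foldl
                    (fun d p => d.modify p.2 [] (· ++ [p.1])) PySem.Dict.empty).getD p.2 []).foldl
                    (fun o j => PySem.List.pySetD o j img) st.1,
                  PySem.Set.add st.2 p.2)
              | none => (st.1, PySem.Set.add st.2 p.2))
          (pl.map g, seen)).1
        = pl.map (fun c => if c ∈ alp then pvMap a b alp c else c) := by
  intro suf
  induction suf with
  | nil =>
    intro pre seen g halp hseen hg
    subst hg
    simp only [PySem.List.enumerate_nil, List.foldl_nil]
    simp [halp]
  | cons x rest ih =>
    intro pre seen g halp hseen hg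
    rw [PySem.List.enumerate_cons, List.foldl_cons]
    have hcast : (((pre ++ [x]).length : Nat) : Int) = (pre.length : Int) + 1 := by
      simp
    by_cases hx : x ∈ pre
    · -- duplicate alphabet char: skipped, its first occurrence was already processed
      have hc : PySem.Set.contains seen x = true := (hseen x).mpr hx
      have hstep : (fun (st : List Char × PySem.Set Char) (p : Int × Char) =>
            if PySem.Set.contains st.2 p.2 then st
            else
              match PySem.List.pyGet? alp (PySem.Int.mod (a * p.1 + b) (alp.length : Int)) with
              | some img =>
                ((((PySem.List.enumerate pl).foldl
                    (fun d p => d.modify p.2 [] (· ++ [p.1])) PySem.Dict.empty).getD p.2 []).foldl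
                    (fun o j => PySem.List.pySetD o j img) st.1,
                  PySem.Set.add st.2 p.2)
              | none => (st.1, PySem.Set.add st.2 p.2))
          (pl.map g, seen) ((pre.length : Int), x) = (pl.map g, seen) := by
        simp only [hc, if_true]
      beta_reduce at hstep
      rw [hstep]
      have hseen' : ∀ c, PySem.Set.contains seen c = true ↔ c ∈ pre ++ [x] := by
        intro c
        rw [hseen c]
        simp only [List.mem_append, List.mem_singleton]
        constructor
        · exact fun h => Or.inl h
        · rintro (h | rfl)
          · exact h
          · exact hx
      have hg' : g = (fun c => if c ∈ pre ++ [x] then pvMap a b alp c else c) := by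
        rw [hg]; funext c
        by_cases hcp : c ∈ pre
        · simp [hcp]
        · have hcx : c ≠ x := fun h => hcp (h ▸ hx)
          simp [hcp, hcx]
      have := ih (pre ++ [x]) seen g (by rw [halp]; simp) hseen' hg'
      rw [hcast] at this
      exact this
    · -- first occurrence: record it in 'seen' and scatter its image over the phrase positions
      have hc : PySem.Set.contains seen x = false := by
        rcases Bool.eq_false_or_eq_true (PySem.Set.contains seen x) with h | h
        · exact absurd ((hseen x).mp h) hx
        · exact h
      have hne : alp ≠ [] := by rw [halp]; simp
      obtain ⟨ch, hch⟩ := Option.isSome_iff_exists.mp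
        (pv_img_isSome a b alp hne (pre.length : Int))
      have hmapx : pvMap a b alp x = ch := by
        unfold pvMap
        rw [halp, pv_index_first pre rest x hx, ← halp]
        simp [hch]
      rw [pvImg] at hch
      have hstep : (fun (st : List Char × PySem.Set Char) (p : Int × Char) =>
            if PySem.Set.contains st.2 p.2 then st
            else
              match PySem.List.pyGet? alp (PySem.Int.mod (a * p.1 + b) (alp.length : Int)) with
              | some img =>
                ((((PySem.List.enumerate pl).foldl
                    (fun d p => d.modify p.2 [] (· ++ [p.1])) PySem.Dict.empty).getD p.2 []).foldl
                    (fun o j => PySem.List.pySetD o j img) st.1,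
                  PySem.Set.add st.2 p.2)
              | none => (st.1, PySem.Set.add st.2 p.2))
          (pl.map g, seen) ((pre.length : Int), x)
          = ((pvJs pl x).foldl (fun o j => PySem.List.pySetD o j ch) (pl.map g),
              PySem.Set.add seen x) := by
        simp only [hc, Bool.false_eq_true, if_false, hch, pv_positions_getD]
      beta_reduce at hstep
      rw [hstep, pv_scatter_map pl g x ch]
      have hseen' : ∀ c, PySem.Set.contains (PySem.Set.add seen x) c = true ↔ c ∈ pre ++ [x] := by
        intro c
        rw [PySem.Set.contains_iff, PySem.Set.mem_add, ← PySem.Set.contains_iff, hseen c]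
        simp only [List.mem_append, List.mem_singleton]
      have hg' : (fun c => if c = x then ch else g c)
          = (fun c => if c ∈ pre ++ [x] then pvMap a b alp c else c) := by
        funext c
        by_cases hcx : c = x
        · simp [hcx, hmapx]
        · rw [hg]
          by_cases hcp : c ∈ pre <;> simp [hcx, hcp]
      have := ih (pre ++ [x]) (PySem.Set.add seen x) (fun c => if c = x then ch else g c)
        (by rw [halp]; simp) hseen' hg'
      rw [hcast] at this
      exact this

-- ===== VERDICT =====
theorem encrypt_affina_ceasar_spec : Claim_equal_encrypt_affina_ceasar := by
  intro a b phrase alp _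
  unfold Spec_encrypt_affina_ceasar encrypt_affina_ceasar
  rw [pv_A_fold a b alp.toList phrase.toList []]
  have hB := pv_B_loop a b phrase.toList alp.toList alp.toList [] PySem.Set.empty
    (fun c => c) rfl (fun c => by simp [PySem.Set.empty, PySem.Set.contains])
    (by funext c; simp)
  simp only [List.length_nil, Nat.cast_zero, List.map_id'] at hB
  simp only [List.nil_append]
  rw [← hB]
  rfl
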